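-- pv_equiv track=rewrite | github.com/itsjay63/Competitive-Programming-Practice | Leetcode/2114. Maximum Number of Words Found in Sentences.py | mostWordsFound
-- ===== SOURCE A (Python) =====
-- from typing import List
--
-- def mostWordsFound(sentences: List[str]) -> int:
--     l = len(sentences)
--     b = []
--     while(l):
--         a = []
--         a = sentences[l-1].split(" ")
--         b.append(len(a))
--         l=l-1
--     return max(b)
-- ===== SOURCE B (Python) =====
-- from typing import List
--
-- def mostWordsFound(sentences: List[str]) -> int:
--     # divide and conquer: max word count of the two halves; a single sentence
--     # has count-of-spaces + 1 words (len(s.split(' ')) == s.count(' ') + 1)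
--     if len(sentences) == 1:
--         return sentences[0].count(" ") + 1
--     mid = len(sentences) // 2
--     return max(mostWordsFound(sentences[:mid]), mostWordsFound(sentences[mid:]))
-- ===== Notes on version B (the rewrite author's own statement) =====
-- stated objective: alternative
-- what changed: Replaces A's reverse-index while loop that splits every sentence into a word list, collects all lengths and takes max(b) with a divide-and-conquer recursion: the list is halved, each half solved recursively, and a single sentence's word count is computed as s.count(' ') + 1 without building the split list.
import Mathlib
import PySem

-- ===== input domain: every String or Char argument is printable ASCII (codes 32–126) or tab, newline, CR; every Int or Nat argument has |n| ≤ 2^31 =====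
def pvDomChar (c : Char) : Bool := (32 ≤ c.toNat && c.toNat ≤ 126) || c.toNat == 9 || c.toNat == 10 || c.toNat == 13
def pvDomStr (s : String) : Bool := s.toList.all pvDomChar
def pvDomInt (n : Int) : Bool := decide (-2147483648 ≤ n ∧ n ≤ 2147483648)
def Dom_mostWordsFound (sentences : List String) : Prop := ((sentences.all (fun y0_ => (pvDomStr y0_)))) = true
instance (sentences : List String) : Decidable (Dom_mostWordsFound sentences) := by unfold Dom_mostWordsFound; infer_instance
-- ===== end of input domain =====

-- B replaces A's reverse-index while loop (split each sentence, collect lengths, max at the end)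
-- by a divide-and-conquer recursion on list halves, counting spaces per sentence: an alternative decomposition.


-- ===== PORT A =====
-- a = sentences[l-1].split(" "); b.append(len(a))  — the per-iteration value
def pvASplitLen (s : String) : Int :=
  (((PySem.Str.split? s " ").getD []).length : Int)

-- the while(l) loop, counting l down and appending len(split) of sentences[l-1]
def pvALoop (sentences : List String) : Nat → List Int → List Int
  | 0, b => b
  | Nat.succ l', b =>
      pvALoop sentences l' (b ++ [pvASplitLen (PySem.List.pyGetD sentences ((l' : Nat) : Int) "")])

def mostWordsFound (sentences : List String) : Int :=
  (PySem.List.max? (pvALoop sentences sentences.length ([] : List Int)) (fun y => y)).getD 0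
  -- max(b); b = [] (ValueError) is outside Pre_

-- ===== PORT B =====
def mostWordsFound_alt (sentences : List String) : Int :=
  if sentences.length = 1 then
    (PySem.Str.count (PySem.List.pyGetD sentences 0 "") " " : Int) + 1
  else if sentences.length = 0 then 0
    -- the Python recurses forever on []; that input is outside Pre_
  else
    let mid := sentences.length / 2   -- len(sentences) // 2 on a nonnegative length
    max (mostWordsFound_alt (PySem.List.slice sentences none (some (mid : Int))))
        (mostWordsFound_alt (PySem.List.slice sentences (some (mid : Int)) none))
termination_by sentences.length
decreasing_by
  · rw [PySem.List.slice_to_natCast]; simp; omega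
  · rw [PySem.List.slice_from_natCast]; simp; omega

-- ===== PRECONDITION & SPEC =====
-- Python's max on A's empty b raises ValueError (and B's recursion never bottoms out) on [].
def Pre_mostWordsFound (sentences : List String) : Prop := sentences ≠ []
instance (sentences : List String) : Decidable (Pre_mostWordsFound sentences) := by
  unfold Pre_mostWordsFound; infer_instance

def pvWitness_mostWordsFound : List String := ["hello world", "", "a  b"]

def Spec_mostWordsFound (sentences : List String) (out : Int) : Prop := out = mostWordsFound_alt sentences
instance (sentences : List String) (out : Int) : Decidable (Spec_mostWordsFound sentences out) := by unfold Spec_mostWordsFound; infer_instance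

-- ===== CLAIM (what is proved, stated in full; the proofs are below) =====
def Claim_equal_mostWordsFound : Prop := ∀ (sentences : List String), Dom_mostWordsFound sentences → Pre_mostWordsFound sentences → Spec_mostWordsFound sentences (mostWordsFound sentences)

-- ===== LEMMAS AND PROOFS =====

-- the common spec value: max over the per-sentence word counts (count of spaces + 1)
def pvCnt (s : String) : Int := (PySem.Str.count s " " : Int) + 1

def pvS (l : List String) : Int :=
  (PySem.List.max? (l.map pvCnt) (fun y => y)).getD 0

-- count.go with the single-character separator [' '] counts the spaces
theorem pvCountGo (l : List Char) : ∀ (fuel acc : Nat), l.length ≤ fuel →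
    PySem.Chars.count.go [' '] fuel l acc = acc + l.countP (· == ' ') := by
  induction l with
  | nil => intro fuel acc _; cases fuel <;> simp [PySem.Chars.count.go]
  | cons c t ih =>
    intro fuel acc h
    cases fuel with
    | zero => simp at h
    | succ f =>
      by_cases hc : c = ' '
      · subst hc
        simp only [PySem.Chars.count.go, List.length_cons] at *
        rw [if_pos (by simp [List.isPrefixOf])]
        simp only [List.length_nil, List.drop_succ_cons, List.drop_zero]
        rw [ih f (acc + 1) (by omega)]
        simp
        omega
      · simp only [PySem.Chars.count.go, List.length_cons] at *
        rw [if_neg (by simp [List.isPrefixOf]; exact fun h => absurd h.symm hc)]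
        rw [ih f acc (by omega)]
        simp [hc]

-- splitOn.go with separator [' '] produces (spaces + 1) pieces (plus the accumulated ones)
theorem pvSplitGo (l : List Char) : ∀ (fuel : Nat) (cur : List Char) (acc : List (List Char)),
    l.length ≤ fuel →
    (PySem.Chars.splitOn.go [' '] fuel l cur acc).length = acc.length + 1 + l.countP (· == ' ') := by
  induction l with
  | nil => intro fuel cur acc _; cases fuel <;> simp [PySem.Chars.splitOn.go]
  | cons c t ih =>
    intro fuel cur acc h
    cases fuel with
    | zero => simp at h
    | succ f =>
      by_cases hc : c = ' '
      · subst hc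
        simp only [PySem.Chars.splitOn.go, List.length_cons] at *
        rw [if_pos (by simp [List.isPrefixOf])]
        simp only [List.length_nil, List.drop_succ_cons, List.drop_zero]
        rw [ih f [] (cur.reverse :: acc) (by omega)]
        simp
        omega
      · simp only [PySem.Chars.splitOn.go, List.length_cons] at *
        rw [if_neg (by simp [List.isPrefixOf]; exact fun h => absurd h.symm hc)]
        rw [ih f (c :: cur) acc (by omega)]
        simp [hc]

-- the per-sentence values of A and B coincide: len(s.split(' ')) = s.count(' ') + 1
theorem pvSplitLen_eq (s : String) : pvASplitLen s = pvCnt s := by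
  unfold pvASplitLen pvCnt
  rw [PySem.Str.count_eq]
  have hsep : (" " : String).toList = [' '] := by decide
  rw [hsep]
  have hsplit : PySem.Str.split? s " " =
      some ((PySem.Chars.splitOn s.toList [' ']).map String.ofList) := by
    simp [PySem.Str.split?, PySem.Chars.split?]
  rw [hsplit]
  simp only [Option.getD_some, List.length_map]
  unfold PySem.Chars.splitOn PySem.Chars.count
  rw [if_neg (by simp)]
  rw [pvSplitGo s.toList (s.toList.length + 1) [] [] (by omega),
      pvCountGo s.toList s.toList.length 0 (le_refl _)]
  simp
  omega

-- A's loop builds the reversed list of per-sentence values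
theorem pvALoop_eq (sentences : List String) : ∀ (l : Nat) (b : List Int), l ≤ sentences.length →
    pvALoop sentences l b = b ++ ((sentences.take l).map pvASplitLen).reverse := by
  intro l
  induction l with
  | zero => intro b _; simp [pvALoop]
  | succ l' ih =>
    intro b h
    have hl : l' < sentences.length := by omega
    have hget : PySem.List.pyGetD sentences ((l' : Nat) : Int) "" = sentences[l'] := by
      rw [PySem.List.pyGetD_natCast]
      exact List.getD_eq_getElem sentences "" hl
    rw [pvALoop, hget, ih _ (by omega)]
    simp only [List.map_take]
    rw [List.take_add_one, List.getElem?_eq_getElem (by simpa using hl)]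
    simp

-- the maximum of a nonempty Int list does not depend on reversal
theorem pvMaxRev (l : List Int) (h : l ≠ []) :
    PySem.List.max? l.reverse (fun y => y) = PySem.List.max? l (fun y => y) := by
  have h1 : l.reverse ≠ [] := by simpa using h
  obtain ⟨m1, hm1⟩ : ∃ m, PySem.List.max? l.reverse (fun y => y) = some m := by
    rcases e : PySem.List.max? l.reverse (fun y => y) with _ | m
    · exact absurd ((PySem.List.max?_eq_none_iff _ _).mp e) h1
    · exact ⟨m, rfl⟩
  obtain ⟨m2, hm2⟩ : ∃ m, PySem.List.max? l (fun y => y) = some m := by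
    rcases e : PySem.List.max? l (fun y => y) with _ | m
    · exact absurd ((PySem.List.max?_eq_none_iff _ _).mp e) h
    · exact ⟨m, rfl⟩
  have mem1 : m1 ∈ l := by simpa using PySem.List.max?_mem hm1
  have mem2 : m2 ∈ l.reverse := by simpa using PySem.List.max?_mem hm2
  have le1 : m1 ≤ m2 := PySem.List.max?_isMax hm2 m1 (by simpa using mem1)
  have le2 : m2 ≤ m1 := PySem.List.max?_isMax hm1 m2 mem2
  rw [hm1, hm2, le_antisymm le1 le2]

-- pulling a max out of a running max
theorem pvFoldlMaxPull (t : List Int) : ∀ (a b : Int), t.foldl max (max a b) = max a (t.foldl max b) := by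
  induction t with
  | nil => intro a b; rfl
  | cons c t ih =>
    intro a b
    simp only [List.foldl_cons]
    rw [max_assoc, ih]

-- pvS splits over a concatenation of nonempty lists
theorem pvS_append (l1 l2 : List String) (h1 : l1 ≠ []) (h2 : l2 ≠ []) :
    pvS (l1 ++ l2) = max (pvS l1) (pvS l2) := by
  obtain ⟨x1, t1, rfl⟩ := List.exists_cons_of_ne_nil h1
  obtain ⟨x2, t2, rfl⟩ := List.exists_cons_of_ne_nil h2
  unfold pvS
  simp only [List.map_append, List.map_cons, List.cons_append,
    PySem.List.max?_id_cons, Option.getD_some]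
  rw [List.foldl_append, List.foldl_cons]
  have := pvFoldlMaxPull (t2.map pvCnt) (List.foldl max (pvCnt x1) (t1.map pvCnt)) (pvCnt x2)
  rw [← this]

-- B computes pvS on every nonempty list
theorem pvAlt_eq : ∀ (n : Nat) (l : List String), l.length ≤ n → l ≠ [] →
    mostWordsFound_alt l = pvS l := by
  intro n
  induction n with
  | zero => intro l h hne; simp at h; exact absurd h hne
  | succ n ih =>
    intro l h hne
    rw [mostWordsFound_alt]
    by_cases h1 : l.length = 1
    · rw [if_pos h1]
      obtain ⟨s, hs⟩ : ∃ s, l = [s] := by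
        cases l with
        | nil => simp at h1
        | cons a t => cases t with
          | nil => exact ⟨a, rfl⟩
          | cons b t' => simp at h1
      subst hs
      simp [pvS, pvCnt, PySem.List.max?_id_cons, PySem.List.pyGetD]
    · rw [if_neg h1, if_neg (by simpa using hne)]
      have hlen : 2 ≤ l.length := by
        have := List.length_pos_of_ne_nil hne
        omega
      simp only [PySem.List.slice_to_natCast, PySem.List.slice_from_natCast]
      have hmid1 : 1 ≤ l.length / 2 := by omega
      have hmid2 : l.length / 2 < l.length := by omega
      have ht : l.take (l.length / 2) ≠ [] := by
        intro hcontra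
        have := congrArg List.length hcontra
        simp only [List.length_take, List.length_nil] at this
        omega
      have hd : l.drop (l.length / 2) ≠ [] := by
        intro hcontra
        have := congrArg List.length hcontra
        simp only [List.length_drop, List.length_nil] at this
        omega
      rw [ih _ (by simp only [List.length_take]; omega) ht, ih _ (by simp only [List.length_drop]; omega) hd,
          ← pvS_append _ _ ht hd, List.take_append_drop]

-- ===== VERDICT (by name: the statement is the Claim_ definition above) =====
theorem mostWordsFound_spec : Claim_equal_mostWordsFound := by
  intro sentences _ hpre
  unfold Spec_mostWordsFound mostWordsFound
  have hne : sentences.map pvASplitLen ≠ [] := by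
    simpa using hpre
  rw [pvALoop_eq sentences sentences.length [] (le_refl _), List.take_length,
      List.nil_append, pvMaxRev _ hne]
  have hmaps : sentences.map pvASplitLen = sentences.map pvCnt :=
    List.map_congr_left (fun s _ => pvSplitLen_eq s)
  rw [hmaps, pvAlt_eq sentences.length sentences (le_refl _) hpre]
  rfl
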